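-- pv_equiv track=rewrite | github.com/mitulparmar7161/Leetcode | 2924.py | findChampion
-- ===== SOURCE A (Python) =====
-- def findChampion(n, edges):
--     """
--     :type n: int
--     :type edges: List[List[int]]
--     :rtype: int
--     """
--     isUndefeated = [True] * n
--
--     for winner, loser in edges:
--         isUndefeated[loser] = False
--
--     champion = -1
--     championCount = 0
--
--     for team in range(n):
--         if isUndefeated[team]:
--             champion = team
--             championCount += 1
--
--     if championCount == 1:
--         return champion
--
--     return -1
-- ===== SOURCE B (Python) =====
-- def findChampion(n, edges):
--     losers = {loser for _, loser in edges}
--     if len(losers) != n - 1: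
--         return -1
--     return n * (n - 1) // 2 - sum(losers)
-- ===== Notes on version B (the rewrite author's own statement) =====
-- stated objective: alternative
-- what changed: Replaces A's boolean array and champion-scanning/counting pass over all teams by an arithmetic identity: there is a champion iff the number of distinct losers is n-1, and then the champion is n*(n-1)//2 minus the sum of the distinct losers - no per-team scan at all.
-- outside the precondition, e.g. on findChampion(2, [[0, -1]]): A returns 0, B returns 2
import Mathlib
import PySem

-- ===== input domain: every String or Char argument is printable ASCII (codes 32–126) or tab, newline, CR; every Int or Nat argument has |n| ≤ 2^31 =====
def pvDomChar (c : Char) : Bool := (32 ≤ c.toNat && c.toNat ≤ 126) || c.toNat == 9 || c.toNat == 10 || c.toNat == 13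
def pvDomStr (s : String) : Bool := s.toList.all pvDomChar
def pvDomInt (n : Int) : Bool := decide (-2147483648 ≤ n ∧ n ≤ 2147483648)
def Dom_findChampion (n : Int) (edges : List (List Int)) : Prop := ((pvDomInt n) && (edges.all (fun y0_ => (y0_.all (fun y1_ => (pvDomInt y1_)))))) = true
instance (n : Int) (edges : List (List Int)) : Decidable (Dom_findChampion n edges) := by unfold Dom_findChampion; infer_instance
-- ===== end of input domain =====

-- B trades A's boolean array plus a champion/count scan over all teams for an arithmetic
-- identity: a champion exists iff there are exactly n-1 distinct losers, and then it equals
-- n*(n-1)//2 minus the sum of the distinct losers (no per-team scan).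

-- ===== PORT A =====
def findChampion (n : Int) (edges : List (List Int)) : Int :=
  let isUndefeated : List Bool := List.replicate n.toNat true
  let isUndefeated : List Bool :=
    edges.foldl (fun ud e => PySem.List.pySetD ud (PySem.List.pyGetD e 1 0) false) isUndefeated
  let st : Int × Int :=
    (PySem.List.pyRange 0 n 1).foldl
      (fun (st : Int × Int) team =>
        if PySem.List.pyGetD isUndefeated team false then (team, st.2 + 1) else st)
      (-1, 0)
  if st.2 = 1 then st.1 else -1

-- ===== PORT B =====
def findChampion_alt (n : Int) (edges : List (List Int)) : Int :=
  let losers : PySem.Set Int := PySem.Set.ofList (edges.map (fun e => PySem.List.pyGetD e 1 0))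
  if PySem.Set.len losers ≠ n - 1 then -1
  else PySem.Int.floordiv (n * (n - 1)) 2 - losers.sum

-- ===== PRECONDITION & SPEC =====
-- Pre_ excludes edge rows that are not pairs (A raises unpacking them) and losers outside
-- 0..n-1 (out of range raises an IndexError in A; a negative loser in [-n,0) silently wraps
-- around in A's list write, an artefact of its boolean-array implementation).
def Pre_findChampion (n : Int) (edges : List (List Int)) : Prop :=
  ∀ e ∈ edges, e.length = 2 ∧ 0 ≤ PySem.List.pyGetD e 1 0 ∧ PySem.List.pyGetD e 1 0 < n
instance (n : Int) (edges : List (List Int)) : Decidable (Pre_findChampion n edges) := by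
  unfold Pre_findChampion; infer_instance
def pvWitness_findChampion : Int × List (List Int) := (3, [[0, 1], [1, 2]])

def Spec_findChampion (n : Int) (edges : List (List Int)) (out : Int) : Prop := out = findChampion_alt n edges
instance (n : Int) (edges : List (List Int)) (out : Int) : Decidable (Spec_findChampion n edges out) := by unfold Spec_findChampion; infer_instance

-- ===== CLAIM (what is proved, stated in full; the proofs are below) =====
def Claim_equal_findChampion : Prop := ∀ (n : Int) (edges : List (List Int)), Dom_findChampion n edges → Pre_findChampion n edges → Spec_findChampion n edges (findChampion n edges)

-- ===== LEMMAS AND PROOFS =====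

-- A's marking loop preserves the length of the boolean list.
lemma mark_length (es : List (List Int)) (ud : List Bool) :
    (es.foldl (fun ud e => PySem.List.pySetD ud (PySem.List.pyGetD e 1 0) false) ud).length
      = ud.length := by
  induction es generalizing ud with
  | nil => rfl
  | cons e es ih => rw [List.foldl_cons, ih, PySem.List.length_pySetD]

-- After A's marking loop, slot t of the boolean list says exactly "t was never a loser".
lemma mark_get (es : List (List Int)) (ud : List Bool)
    (hes : ∀ e ∈ es, 0 ≤ PySem.List.pyGetD e 1 0 ∧ PySem.List.pyGetD e 1 0 < (ud.length : Int))
    (t : Nat) (ht : t < ud.length) :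
    (es.foldl (fun ud e => PySem.List.pySetD ud (PySem.List.pyGetD e 1 0) false) ud)[t]?
        = some (ud[t] && decide ((t : Int) ∉ es.map (fun e => PySem.List.pyGetD e 1 0))) := by
  induction es generalizing ud with
  | nil => simp [List.getElem?_eq_getElem ht]
  | cons e es ih =>
    obtain ⟨hl0, hln⟩ := hes e (List.mem_cons_self ..)
    have hset1 : PySem.List.pySetD ud (PySem.List.pyGetD e 1 0) false
        = ud.set (PySem.List.pyGetD e 1 0).toNat false :=
      PySem.List.pySetD_of_nonneg ud false hl0
    have hlen2 : (ud.set (PySem.List.pyGetD e 1 0).toNat false).length = ud.length :=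
      List.length_set ..
    have hes' : ∀ e' ∈ es, 0 ≤ PySem.List.pyGetD e' 1 0 ∧
        PySem.List.pyGetD e' 1 0 < ((ud.set (PySem.List.pyGetD e 1 0).toNat false).length : Int) := by
      intro e' he'
      rw [hlen2]
      exact hes e' (List.mem_cons_of_mem _ he')
    have ht' : t < (ud.set (PySem.List.pyGetD e 1 0).toNat false).length := by
      rw [hlen2]; exact ht
    rw [List.foldl_cons, hset1, ih _ hes' ht']
    congr 1
    rw [List.getElem_set]
    by_cases hte : (t : Int) = PySem.List.pyGetD e 1 0
    · have htt : (PySem.List.pyGetD e 1 0).toNat = t := by omega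
      simp [hte.symm]
    · have htne : (PySem.List.pyGetD e 1 0).toNat ≠ t := by omega
      rw [if_neg htne]
      simp only [List.map_cons, List.mem_cons]
      rw [decide_not, decide_not]
      congr 1
      simp [hte]

-- A's counting loop over any list computes (last kept element, count of kept elements).
lemma count_loop (xs : List Int) (p : Int → Bool) (c0 k0 : Int) :
    xs.foldl (fun (st : Int × Int) x => if p x then (x, st.2 + 1) else st) (c0, k0)
      = ((xs.filter p).getLastD c0, k0 + ((xs.filter p).length : Int)) := by
  induction xs generalizing c0 k0 with
  | nil => simp
  | cons x xs ih =>
    by_cases hx : p x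
    · simp only [List.foldl_cons, List.filter_cons, hx, if_pos, ih]
      rw [List.getLastD_cons]
      refine Prod.ext rfl ?_
      simp only [List.length_cons]
      push_cast
      ring
    · simp [List.foldl_cons, hx, ih]

-- Gauss: twice the sum of range(0, n) is n*(n-1).
lemma two_mul_sum_range (m : Nat) :
    2 * ((List.range m).map (fun (k : Nat) => (k : Int))).sum = (m : Int) * ((m : Int) - 1) := by
  induction m with
  | zero => simp
  | succ m ih =>
    rw [List.sum_range_succ]
    push_cast
    push_cast at ih
    nlinarith [ih]

-- ===== VERDICT (by name: the statement is the Claim_ definition above) =====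
theorem findChampion_spec : Claim_equal_findChampion := by
  intro n edges _ hpre
  unfold Spec_findChampion
  simp only [findChampion, findChampion_alt]
  set L : List Int := edges.map (fun e => PySem.List.pyGetD e 1 0) with hL
  set S : PySem.Set Int := PySem.Set.ofList L with hS
  set m := edges.foldl (fun ud e => PySem.List.pySetD ud (PySem.List.pyGetD e 1 0) false)
      (List.replicate n.toNat true) with hm
  -- A's boolean lookup on a team in range is "team is not a loser"
  have hlook : ∀ team ∈ PySem.List.pyRange 0 n 1,
      PySem.List.pyGetD m team false = !(L.contains team) := by
    intro team hteam
    obtain ⟨h0, h1⟩ := (PySem.List.mem_pyRange_one ..).1 hteam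
    have hmlen : m.length = n.toNat := by
      rw [hm, mark_length, List.length_replicate]
    have htm : team.toNat < m.length := by omega
    have hsome := mark_get edges (List.replicate n.toNat true)
      (fun e he => by
        obtain ⟨-, hl0, hln⟩ := hpre e he
        exact ⟨hl0, by rw [List.length_replicate]; omega⟩)
      team.toNat (by rw [List.length_replicate]; omega)
    rw [← hm, List.getElem?_eq_getElem htm, List.getElem_replicate,
      Bool.true_and, Int.toNat_of_nonneg h0, ← hL] at hsome
    rw [PySem.List.pyGetD_eq_getElem m false h0 (by omega), Option.some_inj.1 hsome,
      Bool.eq_iff_iff]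
    simp
  rw [PySem.List.foldl_congr_mem (PySem.List.pyRange 0 n 1) _
      (fun (st : Int × Int) team => if !(L.contains team) then (team, st.2 + 1) else st) (-1, 0)
      (fun st team hteam => by rw [hlook team hteam]),
    count_loop]
  dsimp only
  -- names for the range, the undefeated teams and the losers inside the range
  set R : List Int := PySem.List.pyRange 0 n 1 with hR
  set U : List Int := R.filter (fun team => !(L.contains team)) with hU
  set F : List Int := R.filter (fun team => L.contains team) with hF
  -- each loser lies in [0, n)
  have hLbound : ∀ t ∈ L, 0 ≤ t ∧ t < n := by
    intro t ht
    obtain ⟨e, he, rfl⟩ := List.mem_map.1 ht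
    exact (hpre e he).2
  -- facts about R, F, S
  have hRnodup : R.Nodup := PySem.List.nodup_pyRange_one ..
  have hFS : F.Perm S := by
    rw [List.perm_ext_iff_of_nodup (hRnodup.filter _) (PySem.Set.nodup_ofList L)]
    intro t
    rw [List.mem_filter, PySem.Set.mem_ofList, hR, PySem.List.mem_pyRange_one,
      List.contains_iff_mem]
    constructor
    · exact fun h => h.2
    · exact fun h => ⟨hLbound t h, h⟩
  have hperm : (F ++ U).Perm R := List.filter_append_perm _ R
  have hRlen : R.length = n.toNat := by
    rw [hR, PySem.List.length_pyRange_one]; omega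
  have hlen : F.length + U.length = n.toNat := by
    rw [← hRlen, ← hperm.length_eq, List.length_append]
  have hSlenF : (S : List Int).length = F.length := hFS.length_eq.symm
  have hSlen : PySem.Set.len S = ((S : List Int).length : Int) := by
    simp [PySem.Set.len]
  -- the two branch conditions agree
  by_cases hcond : PySem.Set.len S = n - 1
  · -- champion branch: exactly one undefeated team
    have hS0 : (0 : Int) ≤ ((S : List Int).length : Int) := Int.natCast_nonneg _
    have hn1 : 1 ≤ n := by omega
    have hUlen : U.length = 1 := by omega
    obtain ⟨u, hu⟩ := List.length_eq_one_iff.1 hUlen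
    -- sum of the range
    have hRsum : 2 * R.sum = n * (n - 1) := by
      rw [hR, PySem.List.pyRange_one]
      simp only [zero_add, Int.sub_zero]
      rw [two_mul_sum_range, Int.toNat_of_nonneg (by omega : (0 : Int) ≤ n)]
    have hsum : F.sum + U.sum = R.sum := by
      rw [← hperm.sum_eq, List.sum_append]
    have hSsum : (S : List Int).sum = F.sum := hFS.sum_eq.symm
    have hdiv : PySem.Int.floordiv (n * (n - 1)) 2 = R.sum := by
      rw [PySem.Int.floordiv_eq_ediv_of_pos (by omega), ← hRsum]
      omega
    rw [if_pos (by omega : (0 : Int) + (U.length : Int) = 1),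
      if_neg (not_not_intro hcond), hdiv, hSsum, hu]
    simp only [List.getLastD_cons, List.getLastD_nil]
    have husum : F.sum + u = R.sum := by
      rw [← hsum, hu]; simp
    omega
  · -- no champion: the undefeated count is not 1
    have hUne : ¬ ((0 : Int) + (U.length : Int) = 1) := by
      intro h1
      have hU1 : U.length = 1 := by omega
      have hRpos : 1 ≤ R.length := by
        have : U.length ≤ R.length := by
          rw [← hperm.length_eq, List.length_append]; omega
        omega
      omega
    rw [if_neg hUne, if_pos hcond]
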